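-- pv_equiv track=rewrite | github.com/C-Kernel-Engine/C-Kernel-Engine | version/v7/scripts/dataset/materialize_spec19_route_recovery_replay_v7.py | _filter_catalog_rows
-- ===== SOURCE A (Python) =====
-- from typing import Any
--
-- def _filter_catalog_rows(rows: list[dict[str, Any]], forbidden: set[str]) -> tuple[list[dict[str, Any]], list[str]]:
--     kept: list[dict[str, Any]] = []
--     removed: list[str] = []
--     seen_removed: set[str] = set()
--     for row in rows:
--         if not isinstance(row, dict):
--             continue
--         prompt = str(row.get("prompt") or "").strip()
--         if prompt and prompt in forbidden:
--             if prompt not in seen_removed: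
--                 seen_removed.add(prompt)
--                 removed.append(prompt)
--             continue
--         kept.append(row)
--     return kept, removed
-- ===== SOURCE B (Python) =====
-- from typing import Any
--
-- def _filter_catalog_rows(rows: list[dict[str, Any]], forbidden: set[str]) -> tuple[list[dict[str, Any]], list[str]]:
--     def norm(row):
--         return str(row.get("prompt") or "").strip() if isinstance(row, dict) else None
--
--     kept = [row for row in rows if norm(row) is not None and not (norm(row) and norm(row) in forbidden)]
--     removed = list(dict.fromkeys(
--         p for row in rows if (p := norm(row)) is not None and p and p in forbidden
--     ))
--     return kept, removed
-- ===== Notes on version B (the rewrite author's own statement) =====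
-- stated objective: simpler
-- what changed: Replaces the single loop with three interleaved accumulators (kept, removed, seen_removed set) by a two-phase decomposition: one comprehension partitions out the kept rows, a second collects all forbidden prompts, and dict.fromkeys dedups them preserving first-occurrence order, removing the inline seen-set bookkeeping.
import Mathlib
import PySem

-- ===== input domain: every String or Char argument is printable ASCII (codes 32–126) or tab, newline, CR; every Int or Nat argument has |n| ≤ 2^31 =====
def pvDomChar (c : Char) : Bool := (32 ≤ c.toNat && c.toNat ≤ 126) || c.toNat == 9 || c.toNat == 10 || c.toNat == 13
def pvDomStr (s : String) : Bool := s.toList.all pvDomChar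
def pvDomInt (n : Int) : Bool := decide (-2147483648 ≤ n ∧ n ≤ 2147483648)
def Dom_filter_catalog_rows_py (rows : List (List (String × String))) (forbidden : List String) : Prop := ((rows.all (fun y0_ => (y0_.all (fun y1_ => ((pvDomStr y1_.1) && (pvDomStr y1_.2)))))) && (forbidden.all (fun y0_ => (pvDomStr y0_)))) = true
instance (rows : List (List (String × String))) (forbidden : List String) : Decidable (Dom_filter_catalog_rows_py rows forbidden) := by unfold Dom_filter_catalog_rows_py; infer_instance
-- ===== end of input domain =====

-- B replaces A's single loop with three interleaved accumulators (kept / removed / seen set) by a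
-- two-phase decomposition: partition out kept rows, collect all forbidden prompts, then ordered-dedup
-- (dict.fromkeys); objective: simpler, same O(n) cost.

-- ===== PORT A =====
-- single loop carrying (kept, removed, seen_removed); rows are the dict type, so `isinstance(row, dict)` is always true
def filter_catalog_rows_py (rows : List (List (String × String))) (forbidden : List String) : (List (List (String × String))) × List String :=
  let st := rows.foldl
    (fun (st : List (List (String × String)) × List String × PySem.Set String) row =>
      let prompt := PySem.Str.strip (PySem.Dict.getD ⟨row⟩ "prompt" "")  -- str(row.get("prompt") or "").strip(): values are strings, so `or ""` and str() are identity
      if prompt != "" && forbidden.contains prompt then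
        if PySem.Set.contains st.2.2 prompt then st
        else (st.1, st.2.1 ++ [prompt], PySem.Set.add st.2.2 prompt)
      else (st.1 ++ [row], st.2.1, st.2.2))
    ([], [], PySem.Set.empty)
  (st.1, st.2.1)

-- ===== PORT B =====
def pvNorm (row : List (String × String)) : String :=
  PySem.Str.strip (PySem.Dict.getD ⟨row⟩ "prompt" "")

def filter_catalog_rows_py_alt (rows : List (List (String × String))) (forbidden : List String) : (List (List (String × String))) × List String :=
  (rows.filter (fun row => !(pvNorm row != "" && forbidden.contains (pvNorm row))),
   PySem.List.dedup (rows.filterMap (fun row =>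
     let p := pvNorm row
     if p != "" && forbidden.contains p then some p else none)))

-- ===== PRECONDITION & SPEC =====
def Spec_filter_catalog_rows_py (rows : List (List (String × String))) (forbidden : List String) (out : (List (List (String × String))) × List String) : Prop := out = filter_catalog_rows_py_alt rows forbidden
instance (rows : List (List (String × String))) (forbidden : List String) (out : (List (List (String × String))) × List String) : Decidable (Spec_filter_catalog_rows_py rows forbidden out) := by unfold Spec_filter_catalog_rows_py; infer_instance

-- ===== CLAIM (what is proved, stated in full; the proofs are below) =====
def Claim_equal_filter_catalog_rows_py : Prop := ∀ (rows : List (List (String × String))) (forbidden : List String), Dom_filter_catalog_rows_py rows forbidden → Spec_filter_catalog_rows_py rows forbidden (filter_catalog_rows_py rows forbidden)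

-- ===== LEMMAS AND PROOFS =====

-- A's loop shape in the abstract: q decides removal, p is the normalized prompt; the seen set and the
-- removed list start equal and are updated in lockstep, so they stay identified throughout.
lemma pv_loop_spec {α : Type} (q : α → Bool) (p : α → String) :
    ∀ (rows kept : List α) (removed : List String),
      rows.foldl
        (fun (st : List α × List String × PySem.Set String) x =>
          if q x then
            if PySem.Set.contains st.2.2 (p x) then st
            else (st.1, st.2.1 ++ [p x], PySem.Set.add st.2.2 (p x))
          else (st.1 ++ [x], st.2.1, st.2.2))
        (kept, removed, removed)
      = (kept ++ rows.filter (fun x => !q x),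
         PySem.Set.update removed (rows.filterMap (fun x => if q x then some (p x) else none)),
         PySem.Set.update removed (rows.filterMap (fun x => if q x then some (p x) else none))) := by
  intro rows
  induction rows with
  | nil => intro kept removed; simp [PySem.Set.update]
  | cons x t ih =>
    intro kept removed
    simp only [List.foldl_cons, List.filter_cons, List.filterMap_cons]
    by_cases hq : q x = true
    · rw [if_pos hq, if_pos hq]
      simp only [hq, Bool.not_true, Bool.false_eq_true, if_false]
      by_cases hm : p x ∈ removed
      · rw [if_pos (by simpa [PySem.Set.contains_iff] using hm)]
        rw [ih kept removed]
        rw [PySem.Set.update_cons, PySem.Set.add_of_mem hm]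
      · rw [if_neg (by simpa [PySem.Set.contains_iff] using hm)]
        rw [PySem.Set.add_of_not_mem hm, ih kept (removed ++ [p x])]
        rw [PySem.Set.update_cons, PySem.Set.add_of_not_mem hm]
    · rw [if_neg hq, if_neg hq]
      simp only [Bool.not_eq_true] at hq
      simp only [hq, Bool.not_false, if_true]
      rw [ih (kept ++ [x]) removed]
      simp

-- ===== VERDICT (by name: the statement is the Claim_ definition above) =====
theorem filter_catalog_rows_py_spec : Claim_equal_filter_catalog_rows_py := by
  intro rows forbidden _
  show filter_catalog_rows_py rows forbidden = filter_catalog_rows_py_alt rows forbidden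
  unfold filter_catalog_rows_py filter_catalog_rows_py_alt
  rw [show (PySem.Set.empty : PySem.Set String) = ([] : List String) from rfl]
  rw [pv_loop_spec
        (fun row : List (String × String) =>
          PySem.Str.strip (PySem.Dict.getD ⟨row⟩ "prompt" "") != "" &&
            forbidden.contains (PySem.Str.strip (PySem.Dict.getD ⟨row⟩ "prompt" "")))
        (fun row : List (String × String) =>
          PySem.Str.strip (PySem.Dict.getD ⟨row⟩ "prompt" ""))
        rows [] []]
  simp [pvNorm, PySem.Set.update_nil_left, PySem.List.dedup_eq_ofList]
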